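-- pv_equiv track=rewrite | github.com/HoneyMelon/small-projects | Python/projects/diagram.py | _get_min_max_for_one_dataset
-- ===== SOURCE A (Python) =====
-- def _get_min_max_for_one_dataset(array):
--     """
--     @param array: 2d Array
--     @return: min and max values for x and y
--     Calulates min and max for an array with one dataset of points
--     """
--     minX = 0
--     maxX = 0
--     minY = 0
--     maxY = 0
--     for point in array:
--         newX = point[0]
--         newY = point[1]
--         minX = newX if newX < minX else minX
--         maxX = newX if newX > maxX else maxX
--         minY = newY if newY < minY else minY
--         maxY = newY if newY > maxY else maxY
--
--     return minX, maxX, minY, maxY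
-- ===== SOURCE B (Python) =====
-- def _get_min_max_for_one_dataset(array):
--     xs = [p[0] for p in array]
--     ys = [p[1] for p in array]
--     return min([0] + xs), max([0] + xs), min([0] + ys), max([0] + ys)
-- ===== Notes on version B (the rewrite author's own statement) =====
-- stated objective: simpler
-- what changed: The fused four-accumulator loop is replaced by extracting the x- and y-coordinate columns and computing each bound as an independent min/max reduction over the 0-seeded column.
import Mathlib
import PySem

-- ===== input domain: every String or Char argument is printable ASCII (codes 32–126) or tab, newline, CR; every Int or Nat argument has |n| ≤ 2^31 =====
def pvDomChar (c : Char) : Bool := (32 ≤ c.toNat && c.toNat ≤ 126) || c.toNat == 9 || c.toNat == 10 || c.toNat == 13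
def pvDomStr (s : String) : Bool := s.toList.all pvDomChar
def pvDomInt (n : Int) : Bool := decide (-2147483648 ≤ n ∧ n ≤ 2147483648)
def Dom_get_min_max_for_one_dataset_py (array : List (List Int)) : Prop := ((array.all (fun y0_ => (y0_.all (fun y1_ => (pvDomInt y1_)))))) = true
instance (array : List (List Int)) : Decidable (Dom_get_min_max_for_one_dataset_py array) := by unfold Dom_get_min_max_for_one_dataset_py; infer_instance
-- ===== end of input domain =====

-- B replaces the fused four-accumulator loop by independent min/max reductions over the
-- 0-seeded coordinate columns (objective: simpler).

-- ===== PORT A =====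
-- point[0], point[1]: Pre_ guarantees 2 ≤ point.length, so List.getD is exact there
-- (Python raises IndexError on shorter points; those inputs are outside Pre_).
def get_min_max_for_one_dataset_py (array : List (List Int)) : Int × Int × Int × Int :=
  let r := array.foldl
    (fun (s : Int × Int × Int × Int) (point : List Int) =>
      let newX := point.getD 0 0
      let newY := point.getD 1 0
      (if newX < s.1 then newX else s.1,
       if newX > s.2.1 then newX else s.2.1,
       if newY < s.2.2.1 then newY else s.2.2.1,
       if newY > s.2.2.2 then newY else s.2.2.2))
    (0, 0, 0, 0)
  r

-- ===== PORT B =====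
-- Python's min/max over the nonempty int list [0] + column = foldl min/max 0 over the column.
def get_min_max_for_one_dataset_py_alt (array : List (List Int)) : Int × Int × Int × Int :=
  let xs := array.map (fun p => p.getD 0 0)
  let ys := array.map (fun p => p.getD 1 0)
  (xs.foldl min 0, xs.foldl max 0, ys.foldl min 0, ys.foldl max 0)

-- ===== PRECONDITION & SPEC =====
-- Pre_ excludes exactly the inputs on which Python A raises IndexError: a point with fewer than 2 coordinates.
def Pre_get_min_max_for_one_dataset_py (array : List (List Int)) : Prop :=
  ∀ p ∈ array, 2 ≤ p.length
instance (array : List (List Int)) : Decidable (Pre_get_min_max_for_one_dataset_py array) := by unfold Pre_get_min_max_for_one_dataset_py; infer_instance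
def pvWitness_get_min_max_for_one_dataset_py : List (List Int) := [[3, -2], [-1, 5]]

def Spec_get_min_max_for_one_dataset_py (array : List (List Int)) (out : Int × Int × Int × Int) : Prop := out = get_min_max_for_one_dataset_py_alt array
instance (array : List (List Int)) (out : Int × Int × Int × Int) : Decidable (Spec_get_min_max_for_one_dataset_py array out) := by unfold Spec_get_min_max_for_one_dataset_py; infer_instance

-- ===== CLAIM (what is proved, stated in full; the proofs are below) =====
def Claim_equal_get_min_max_for_one_dataset_py : Prop := ∀ (array : List (List Int)), Dom_get_min_max_for_one_dataset_py array → Pre_get_min_max_for_one_dataset_py array → Spec_get_min_max_for_one_dataset_py array (get_min_max_for_one_dataset_py array)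

-- ===== LEMMAS AND PROOFS =====
theorem pv_if_min (x a : Int) : (if x < a then x else a) = min a x := by
  simp only [min_def]; split_ifs <;> omega

theorem pv_if_max (x b : Int) : (if x > b then x else b) = max b x := by
  simp only [max_def]; split_ifs <;> omega

theorem pv_fold_split (array : List (List Int)) (a b c d : Int) :
    array.foldl
      (fun (s : Int × Int × Int × Int) (point : List Int) =>
        let newX := point.getD 0 0
        let newY := point.getD 1 0
        (if newX < s.1 then newX else s.1,
         if newX > s.2.1 then newX else s.2.1,
         if newY < s.2.2.1 then newY else s.2.2.1,
         if newY > s.2.2.2 then newY else s.2.2.2))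
      (a, b, c, d)
    = ((array.map (fun p => p.getD 0 0)).foldl min a,
       (array.map (fun p => p.getD 0 0)).foldl max b,
       (array.map (fun p => p.getD 1 0)).foldl min c,
       (array.map (fun p => p.getD 1 0)).foldl max d) := by
  induction array generalizing a b c d with
  | nil => simp
  | cons p t ih =>
    simp only [List.foldl_cons, List.map_cons]
    rw [pv_if_min, pv_if_max, pv_if_min, pv_if_max]
    exact ih _ _ _ _

-- ===== VERDICT (by name: the statement is the Claim_ definition above) =====
theorem get_min_max_for_one_dataset_py_spec : Claim_equal_get_min_max_for_one_dataset_py := by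
  intro array _ _
  unfold Spec_get_min_max_for_one_dataset_py get_min_max_for_one_dataset_py get_min_max_for_one_dataset_py_alt
  simp only []
  exact pv_fold_split array 0 0 0 0
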